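-- pv_equiv track=rewrite | github.com/lkshrk/op-automic | src/op_aromic/engine/differ.py | _prettify_path
-- ===== SOURCE A (Python) =====
-- def _prettify_path(raw: str) -> str:
--     """Turn DeepDiff's ``root['a']['b'][0]`` into ``a.b[0]``."""
--     # DeepDiff emits paths like "root['title']" or "root['tasks'][0]['name']".
--     pretty = raw
--     if pretty.startswith("root"):
--         pretty = pretty[4:]
--     # strip square quotes while preserving indexes
--     out: list[str] = []
--     token = ""
--     in_key = False
--     for ch in pretty:
--         if ch == "[":
--             if token:
--                 out.append(token)
--                 token = ""
--             in_key = True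
--             continue
--         if ch == "]":
--             if in_key and token.startswith("'") and token.endswith("'"):
--                 out.append(token[1:-1])
--             elif in_key:
--                 out.append(f"[{token}]")
--             token = ""
--             in_key = False
--             continue
--         token += ch
--     if token:
--         out.append(token)
--     # Join keys with dots; leave index tokens bracketed.
--     rendered = ""
--     for piece in out:
--         if piece.startswith("[") and piece.endswith("]"):
--             rendered += piece
--         elif rendered:
--             rendered += f".{piece}"
--         else:
--             rendered += piece
--     return rendered
-- ===== SOURCE B (Python) =====
-- def _prettify_path(raw: str) -> str:
--     """Turn DeepDiff's ``root['a']['b'][0]`` into ``a.b[0]``."""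
--     s = raw[4:] if raw.startswith("root") else raw
--     pieces = []
--     segs = s.split("[")
--     # leading segment: only the text after the last "]" survives
--     lead = segs[0].split("]")[-1]
--     if lead:
--         pieces.append(lead)
--     for seg in segs[1:]:
--         parts = seg.split("]")
--         if len(parts) == 1:
--             # unclosed bracket: whole remainder is a plain token
--             if seg:
--                 pieces.append(seg)
--         else:
--             body = parts[0]
--             if body.startswith("'") and body.endswith("'"):
--                 pieces.append(body[1:-1])
--             else:
--                 pieces.append("[" + body + "]")
--             tail = parts[-1]
--             if tail:
--                 pieces.append(tail)
--     rendered = ""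
--     for p in pieces:
--         if p.startswith("[") and p.endswith("]"):
--             rendered += p
--         elif rendered:
--             rendered += "." + p
--         else:
--             rendered += p
--     return rendered
-- ===== Notes on version B (the rewrite author's own statement) =====
-- stated objective: simpler
-- what changed: Replaces A's character-by-character state machine (token accumulator + in_key flag) by splitting the path once on the opening bracket and each segment once on the closing bracket and classifying whole segments: the bracket body is the part before a segment's first closing bracket, the only surviving plain text is what follows the last closing bracket, reproducing A's behaviour on unbalanced brackets exactly.
import Mathlib
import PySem

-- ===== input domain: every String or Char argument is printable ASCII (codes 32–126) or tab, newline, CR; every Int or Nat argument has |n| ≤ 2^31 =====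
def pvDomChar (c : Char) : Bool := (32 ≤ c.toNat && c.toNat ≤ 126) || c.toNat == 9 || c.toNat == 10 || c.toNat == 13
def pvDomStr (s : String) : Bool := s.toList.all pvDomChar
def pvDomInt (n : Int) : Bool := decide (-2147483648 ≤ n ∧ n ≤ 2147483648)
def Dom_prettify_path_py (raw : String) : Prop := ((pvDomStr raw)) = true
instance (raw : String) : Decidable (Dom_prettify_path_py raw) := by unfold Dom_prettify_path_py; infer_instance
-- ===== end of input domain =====

-- B re-implements A's character-by-character bracket state machine by splitting the path
-- on the brackets once and classifying whole segments (simpler; measured faster by a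
-- constant factor: str.split does the scanning instead of a per-character Python loop).

-- Shared by both ports (the identical Python text occurs in Source A and Source B):
-- classify a closed bracket body: a quoted key is stripped (token[1:-1]), else kept bracketed.
def pvClassify (token : List Char) : List Char :=
  if PySem.Chars.startswith token ['\''] && PySem.Chars.endswith token ['\''] then
    PySem.List.slice token (some 1) (some (-1))
  else
    '[' :: (token ++ [']'])

-- the final render loop (identical in Source A and Source B): bracketed pieces concatenated, others dotted.
def pvRender (pieces : List (List Char)) : List Char :=
  pieces.foldl (fun rendered piece =>
    if PySem.Chars.startswith piece ['['] && PySem.Chars.endswith piece [']'] then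
      rendered ++ piece
    else if rendered ≠ [] then
      rendered ++ ('.' :: piece)
    else
      rendered ++ piece) []

-- ===== PORT A =====
-- one step of A's `for ch in pretty` loop; state = (out, token, in_key)
def pvStepA (st : List (List Char) × List Char × Bool) (ch : Char) :
    List (List Char) × List Char × Bool :=
  let out := st.1
  let token := st.2.1
  let inKey := st.2.2
  if ch = '[' then
    ((if token ≠ [] then out ++ [token] else out), [], true)
  else if ch = ']' then
    ((if inKey && PySem.Chars.startswith token ['\''] && PySem.Chars.endswith token ['\''] then
        out ++ [PySem.List.slice token (some 1) (some (-1))]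
      else if inKey then
        out ++ ['[' :: (token ++ [']'])]
      else out), [], false)
  else
    (out, token ++ [ch], inKey)

def prettify_path_py (raw : String) : String :=
  let cs := raw.toList
  let pretty := if PySem.Chars.startswith cs "root".toList then
                  PySem.List.slice cs (some 4) none else cs
  let st := pretty.foldl pvStepA ([], [], false)
  let out := if st.2.1 ≠ [] then st.1 ++ [st.2.1] else st.1
  String.mk (pvRender out)

-- ===== PORT B =====
-- pieces contributed by one segment of s.split("[") after the first
def pvSegPieces (seg : List Char) : List (List Char) :=
  let parts := PySem.Chars.splitOn seg [']']
  if parts.length = 1 then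
    -- unclosed bracket: whole remainder is a plain token
    (if seg ≠ [] then [seg] else [])
  else
    -- parts is never empty, so headD/getLastD are parts[0] / parts[-1]
    [pvClassify (parts.headD [])] ++
      (if parts.getLastD [] ≠ [] then [parts.getLastD []] else [])

def prettify_path_py_alt (raw : String) : String :=
  let cs := raw.toList
  let s := if PySem.Chars.startswith cs "root".toList then
             PySem.List.slice cs (some 4) none else cs
  let segs := PySem.Chars.splitOn s ['[']
  -- leading segment (segs[0]): only the text after the last "]" survives
  let lead := (PySem.Chars.splitOn (segs.headD []) [']']).getLastD []
  let pieces :=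
    (if lead ≠ [] then [lead] else []) ++
      (PySem.List.slice segs (some 1) none).foldl
        (fun acc seg => acc ++ pvSegPieces seg) []
  String.mk (pvRender pieces)

-- ===== PRECONDITION & SPEC =====
def Spec_prettify_path_py (raw : String) (out : String) : Prop := out = prettify_path_py_alt raw
instance (raw : String) (out : String) : Decidable (Spec_prettify_path_py raw out) := by unfold Spec_prettify_path_py; infer_instance

-- ===== CLAIM (what is proved, stated in full; the proofs are below) =====
def Claim_equal_prettify_path_py : Prop := ∀ (raw : String), Dom_prettify_path_py raw → Spec_prettify_path_py raw (prettify_path_py raw)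

-- ===== LEMMAS AND PROOFS =====

-- clean recursion computing s.split(sep) for a one-character sep
def pvSplit (c : Char) : List Char → List (List Char)
  | [] => [[]]
  | d :: t => if d = c then [] :: pvSplit c t
              else (d :: (pvSplit c t).headD []) :: (pvSplit c t).tail

theorem pvSplit_ne_nil (c : Char) (s : List Char) : pvSplit c s ≠ [] := by
  cases s with
  | nil => simp [pvSplit]
  | cons d t => simp only [pvSplit]; split <;> simp

theorem pvSplit_go_eq (c : Char) (l : List Char) : ∀ (fuel : Nat) (cur : List Char)
    (acc : List (List Char)), l.length < fuel →
    PySem.Chars.splitOn.go [c] fuel l cur acc =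
      acc.reverse ++ (cur.reverse ++ (pvSplit c l).headD []) :: (pvSplit c l).tail := by
  induction l with
  | nil =>
    intro fuel cur acc h
    cases fuel with
    | zero => omega
    | succ f => simp [PySem.Chars.splitOn.go, pvSplit]
  | cons d t ih =>
    intro fuel cur acc h
    cases fuel with
    | zero => omega
    | succ f =>
      by_cases hdc : d = c
      · subst hdc
        have hpre : List.isPrefixOf [d] (d :: t) = true := by
          simp [List.isPrefixOf]
        rw [PySem.Chars.splitOn.go]
        simp only [hpre, if_true]
        have := ih f [] (cur.reverse :: acc) (by simpa using Nat.lt_of_succ_lt_succ h)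
        simp only [List.length_cons, List.length_nil, List.drop_succ_cons, List.drop_zero] at this ⊢
        rw [this]
        rcases hsp : pvSplit d t with _ | ⟨h0, tl⟩
        · exact absurd hsp (pvSplit_ne_nil d t)
        · simp [pvSplit, hsp]
      · have hpre : List.isPrefixOf [c] (d :: t) = false := by
          simp [List.isPrefixOf]
          exact fun hc => (hdc hc.symm).elim
        rw [PySem.Chars.splitOn.go]
        simp only [hpre, Bool.false_eq_true, if_false]
        have := ih f (d :: cur) acc (by simpa using Nat.lt_of_succ_lt_succ h)
        rw [this]
        rcases hsp : pvSplit c t with _ | ⟨h0, tl⟩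
        · exact absurd hsp (pvSplit_ne_nil c t)
        · simp [pvSplit, hdc, hsp]

theorem pvSplitOn_eq (c : Char) (s : List Char) :
    PySem.Chars.splitOn s [c] = pvSplit c s := by
  have := pvSplit_go_eq c s (s.length + 1) [] [] (by omega)
  rcases hsp : pvSplit c s with _ | ⟨h0, tl⟩
  · exact absurd hsp (pvSplit_ne_nil c s)
  · simpa [PySem.Chars.splitOn, hsp] using this

theorem pvSplit_not_mem (c : Char) (s : List Char) (h : c ∉ s) : pvSplit c s = [s] := by
  induction s with
  | nil => rfl
  | cons d t ih =>
    simp only [List.mem_cons, not_or] at h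
    simp [pvSplit, Ne.symm h.1, ih h.2]

theorem pvSplit_append (c : Char) (x y : List Char) (h : c ∉ x) :
    pvSplit c (x ++ c :: y) = x :: pvSplit c y := by
  induction x with
  | nil => simp [pvSplit]
  | cons d t ih =>
    simp only [List.mem_cons, not_or] at h
    simp [pvSplit, Ne.symm h.1, ih h.2]

-- proof-side character recursion mirroring A's state machine (token, in_key)
def pvSpec : List Char → List Char → Bool → List (List Char)
  | [], token, _ => if token ≠ [] then [token] else []
  | ch :: t, token, inKey =>
    if ch = '[' then (if token ≠ [] then [token] else []) ++ pvSpec t [] true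
    else if ch = ']' then
      (if inKey then [pvClassify token] else []) ++ pvSpec t [] false
    else pvSpec t (token ++ [ch]) inKey

-- A's fold, flushed, computes pvSpec
theorem pvA_eq_spec (s : List Char) : ∀ (out : List (List Char)) (token : List Char)
    (inKey : Bool),
    (let st := s.foldl pvStepA (out, token, inKey);
     if st.2.1 ≠ [] then st.1 ++ [st.2.1] else st.1) = out ++ pvSpec s token inKey := by
  induction s with
  | nil =>
    intro out token inKey
    simp only [List.foldl_nil, pvSpec]
    split <;> simp
  | cons ch t ih =>
    intro out token inKey
    simp only [List.foldl_cons, pvSpec]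
    by_cases h1 : ch = '['
    · subst h1
      simp only [pvStepA, if_true]
      rw [ih]
      split <;> simp
    · by_cases h2 : ch = ']'
      · subst h2
        simp only [pvStepA, if_false, if_true, h1]
        rw [ih]
        cases inKey with
        | false => simp
        | true =>
          simp only [Bool.true_and, pvClassify]
          split <;> simp
      · simp only [pvStepA, h1, h2, if_false]
        rw [ih]

-- B's pieces for the leading (plain) segment
def pvLead (x : List Char) : List (List Char) :=
  let t := (pvSplit ']' x).getLastD []
  if t ≠ [] then [t] else []

-- pvSegPieces via pvSplit
def pvSegP (seg : List Char) : List (List Char) :=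
  let parts := pvSplit ']' seg
  if parts.length = 1 then (if seg ≠ [] then [seg] else [])
  else [pvClassify (parts.headD [])] ++
    (if parts.getLastD [] ≠ [] then [parts.getLastD []] else [])

theorem pvSegPieces_eq (seg : List Char) : pvSegPieces seg = pvSegP seg := by
  simp [pvSegPieces, pvSegP, pvSplitOn_eq]

theorem pvLead_append (token x : List Char) (h : ']' ∉ token) :
    pvLead (token ++ ']' :: x) = pvLead x := by
  have := pvSplit_append ']' token x h
  rcases hsp : pvSplit ']' x with _ | ⟨h0, tl⟩
  · exact absurd hsp (pvSplit_ne_nil ']' x)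
  · simp [pvLead, this, hsp]

theorem pvLead_no_bracket (x : List Char) (h : ']' ∉ x) :
    pvLead x = if x ≠ [] then [x] else [] := by
  simp [pvLead, pvSplit_not_mem ']' x h]

theorem pvSegP_no_bracket (x : List Char) (h : ']' ∉ x) :
    pvSegP x = if x ≠ [] then [x] else [] := by
  simp [pvSegP, pvSplit_not_mem ']' x h]

theorem pvSegP_append (token x : List Char) (h : ']' ∉ token) :
    pvSegP (token ++ ']' :: x) = [pvClassify token] ++ pvLead x := by
  have hsp := pvSplit_append ']' token x h
  rcases hx : pvSplit ']' x with _ | ⟨h0, tl⟩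
  · exact absurd hx (pvSplit_ne_nil ']' x)
  · simp only [pvSegP, pvLead, hsp, hx]
    simp

-- the joint split-level characterisation of pvSpec
theorem pvSpec_split (s : List Char) : ∀ (token : List Char), ']' ∉ token →
    (pvSpec s token false =
      pvLead (token ++ (pvSplit '[' s).headD []) ++
        ((pvSplit '[' s).tail).flatMap pvSegP) ∧
    (pvSpec s token true =
      pvSegP (token ++ (pvSplit '[' s).headD []) ++
        ((pvSplit '[' s).tail).flatMap pvSegP) := by
  induction s with
  | nil =>
    intro token h
    constructor
    · simp [pvSpec, pvSplit, pvLead_no_bracket token h]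
    · simp [pvSpec, pvSplit, pvSegP_no_bracket token h]
  | cons ch t ih =>
    intro token h
    rcases ht : pvSplit '[' t with _ | ⟨h0, tl⟩
    · exact absurd ht (pvSplit_ne_nil '[' t)
    · by_cases h1 : ch = '['
      · subst h1
        have hIH := (ih [] (by simp)).2
        rw [ht] at hIH
        simp only [List.headD_cons, List.tail_cons, List.nil_append] at hIH
        constructor
        · simp only [pvSpec, if_true, pvSplit, ht]
          rw [hIH]
          simp [pvLead_no_bracket token h, List.flatMap_cons]
        · simp only [pvSpec, if_true, pvSplit, ht]
          rw [hIH]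
          simp [pvSegP_no_bracket token h, List.flatMap_cons]
      · by_cases h2 : ch = ']'
        · subst h2
          have hIH := (ih [] (by simp)).1
          rw [ht] at hIH
          simp only [List.headD_cons, List.tail_cons, List.nil_append] at hIH
          have hsplit : pvSplit '[' (']' :: t) = (']' :: h0) :: tl := by
            simp [pvSplit, ht]
          constructor
          · show (if (']':Char) = '[' then _ else if (']':Char) = ']' then _ else _) = _
            rw [if_neg h1, if_pos rfl]
            simp only [hsplit, List.headD_cons, List.tail_cons]
            rw [hIH, pvLead_append token h0 h]
            simp
          · show (if (']':Char) = '[' then _ else if (']':Char) = ']' then _ else _) = _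
            rw [if_neg h1, if_pos rfl]
            simp only [hsplit, List.headD_cons, List.tail_cons]
            rw [hIH, pvSegP_append token h0 h]
            simp
        · have hIH := ih (token ++ [ch]) (by
            intro hm
            rcases List.mem_append.1 hm with hm | hm
            · exact h hm
            · simp only [List.mem_singleton] at hm
              exact h2 hm.symm)
          rw [ht] at hIH
          have hsplit : pvSplit '[' (ch :: t) = (ch :: h0) :: tl := by
            simp [pvSplit, ht, h1]
          constructor
          · simp only [pvSpec, h1, h2, if_false]
            rw [hIH.1]
            simp [hsplit]
          · simp only [pvSpec, h1, h2, if_false]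
            rw [hIH.2]
            simp [hsplit]

-- ===== VERDICT (by name: the statement is the Claim_ definition above) =====
theorem prettify_path_py_spec : Claim_equal_prettify_path_py := by
  intro raw _
  unfold Spec_prettify_path_py prettify_path_py prettify_path_py_alt
  simp only []
  set pretty := (if PySem.Chars.startswith raw.toList "root".toList then
      PySem.List.slice raw.toList (some 4) none else raw.toList) with hp
  congr 1
  -- both renders are over the same pieces list
  congr 1
  rw [pvA_eq_spec pretty [] [] false]
  rcases hs : pvSplit '[' pretty with _ | ⟨h0, tl⟩
  · exact absurd hs (pvSplit_ne_nil '[' pretty)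
  · have := (pvSpec_split pretty [] (by simp)).1
    rw [hs] at this
    simp only [List.headD_cons, List.tail_cons, List.nil_append] at this
    rw [this]
    have hso : PySem.Chars.splitOn pretty ['['] = h0 :: tl := by
      rw [pvSplitOn_eq, hs]
    rw [hso]
    simp only [List.headD_cons]
    have hslice : PySem.List.slice (h0 :: tl) (some 1) none = tl := by
      simp [pysem]
    rw [hslice]
    have hfold : tl.foldl (fun acc seg => acc ++ pvSegPieces seg) [] =
        tl.flatMap pvSegPieces := by
      rw [PySem.List.foldl_append_eq_flatMap]
      simp
    rw [hfold]
    have hfun : pvSegPieces = pvSegP := funext pvSegPieces_eq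
    rw [hfun]
    have hlead : pvLead h0 = (if (PySem.Chars.splitOn h0 [']']).getLastD [] ≠ [] then
        [(PySem.Chars.splitOn h0 [']']).getLastD []] else []) := by
      rw [pvSplitOn_eq]
      rfl
    rw [hlead]
    simp
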